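-- pv_equiv track=rewrite | github.com/coding4kicks/parallelspider-open | spiderengine/tests/test_parallelspider.py | _sort_output
-- ===== SOURCE A (Python) =====
-- def _sort_output(map_output):
--     """Sorts mapper output for reducer. The sort phase of map reduce."""
--
--     sorted_out = sorted(map_output)
--     # split the sorted output based upon key types
--     # necessary since different value sizes for key type
--     total_out = [] # list to hold outputs for each key type
--     mini_out = [] # list to hold each type's keys
--     previous_key_type = sorted_out[0][0][0:4]
--
--     for out in sorted_out:
--         key_type = out[0][0:4]
--         if key_type == previous_key_type:
--             mini_out.append(out)
--         else:
--             total_out.append(mini_out)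
--             mini_out = [out]
--             previous_key_type = key_type
--
--     total_out.append(mini_out)
--     reducer_input = []
--
--     for sorted_out in total_out:
--         # Save the value of the previous key for comparison
--         previous_key = sorted_out[0][0]
--         key = ""
--         value_list = []
--         # For each instance of the same key combine values
--         for out in sorted_out:
--             key, value = out
--             # If the key is the same just add items to list
--             if key == previous_key:
--                 value_list.append(value)
--             # If key is different, output new key_value, reset lists
--             else:
--                 key_value = (previous_key, value_list)
--                 reducer_input.append(key_value)
--                 previous_key = key
--                 value_list = [value]
--         # Clean up last one
--         key_value = (key, value_list)
--         reducer_input.append(key_value)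
--
--     return reducer_input
-- ===== SOURCE B (Python) =====
-- def _sort_output(map_output):
--     """Sorts mapper output for reducer: one linear pass over the sorted pairs,
--     flushing a (key, value_list) group whenever the key changes."""
--     sorted_out = sorted(map_output)
--     previous_key = sorted_out[0][0]
--     value_list = []
--     reducer_input = []
--     for key, value in sorted_out:
--         if key != previous_key:
--             reducer_input.append((previous_key, value_list))
--             previous_key = key
--             value_list = []
--         value_list.append(value)
--     reducer_input.append((previous_key, value_list))
--     return reducer_input
-- ===== Notes on version B (the rewrite author's own statement) =====
-- stated objective: simpler
-- what changed: Replaces A's two phases (split the sorted list into 4-char-prefix buckets, then group each bucket by key with a nested loop) by a single linear pass over the sorted pairs that flushes a group whenever the full key changes; the prefix buckets are redundant because equal keys share their prefix.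
import Mathlib
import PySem

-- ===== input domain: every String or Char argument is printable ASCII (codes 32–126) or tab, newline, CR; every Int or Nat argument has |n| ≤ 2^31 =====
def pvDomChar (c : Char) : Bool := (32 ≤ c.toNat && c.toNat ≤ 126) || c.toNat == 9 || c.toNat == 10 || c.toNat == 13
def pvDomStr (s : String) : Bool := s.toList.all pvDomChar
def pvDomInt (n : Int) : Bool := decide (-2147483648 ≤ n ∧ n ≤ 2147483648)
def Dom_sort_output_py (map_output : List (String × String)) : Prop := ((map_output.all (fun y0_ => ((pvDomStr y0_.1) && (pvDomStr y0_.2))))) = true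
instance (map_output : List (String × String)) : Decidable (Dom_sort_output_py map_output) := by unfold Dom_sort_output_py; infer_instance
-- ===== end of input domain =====

-- B replaces A's two-phase grouping (prefix buckets, then per-bucket key grouping) by one
-- linear pass over the sorted pairs — simpler, same result; proved equal on nonempty input.


-- ===== PORT A =====
-- out[0][0:4] : the first four characters of the key
def pvPfx (s : String) : String := PySem.Str.slice s (some 0) (some 4)

-- phase-1 loop body: state = (total_out, mini_out, previous_key_type)
def pvStepA1 (st : List (List (String × String)) × List (String × String) × String)
    (out : String × String) : List (List (String × String)) × List (String × String) × String :=
  let key_type := pvPfx out.1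
  if key_type = st.2.2 then (st.1, st.2.1 ++ [out], st.2.2)
  else (st.1 ++ [st.2.1], [out], key_type)

-- phase-2 inner loop body: state = (previous_key, key, value_list, reducer_input)
def pvStepA2i (st : String × String × List String × List (String × List String))
    (out : String × String) : String × String × List String × List (String × List String) :=
  match st with
  | (previous_key, _key, value_list, acc) =>
    if out.1 = previous_key then (previous_key, out.1, value_list ++ [out.2], acc)
    else (out.1, out.1, [out.2], acc ++ [(previous_key, value_list)])

-- phase-2 outer loop body: one bucket of the same key type
def pvStepA2 (reducer_input : List (String × List String)) (bucket : List (String × String)) :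
    List (String × List String) :=
  match bucket with
  | [] => reducer_input   -- Python would raise IndexError at sorted_out[0]; buckets are never empty
  | b :: _ =>
    let st := bucket.foldl pvStepA2i (b.1, "", [], reducer_input)
    match st with
    | (_previous_key, key, value_list, acc) => acc ++ [(key, value_list)]

def sort_output_py (map_output : List (String × String)) : List (String × List String) :=
  let sorted_out := PySem.List.sorted2 map_output Prod.fst Prod.snd
  match sorted_out with
  | [] => []   -- Python raises IndexError at sorted_out[0]; excluded by Pre_
  | first :: _ =>
    let previous_key_type := pvPfx first.1
    let st := sorted_out.foldl pvStepA1 ([], [], previous_key_type)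
    let total_out := st.1 ++ [st.2.1]
    total_out.foldl pvStepA2 []

-- ===== PORT B =====
-- single-pass loop body: state = (previous_key, value_list, reducer_input);
-- flush the finished group when the key changes, then append the value
def pvStepB (st : String × List String × List (String × List String)) (kv : String × String) :
    String × List String × List (String × List String) :=
  let st' := if kv.1 ≠ st.1 then (kv.1, ([] : List String), st.2.2 ++ [(st.1, st.2.1)]) else st
  (st'.1, st'.2.1 ++ [kv.2], st'.2.2)

def sort_output_py_alt (map_output : List (String × String)) : List (String × List String) :=
  let sorted_out := PySem.List.sorted2 map_output Prod.fst Prod.snd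
  match sorted_out with
  | [] => []   -- Python raises IndexError at sorted_out[0][0]; excluded by Pre_
  | first :: _ =>
    let st := sorted_out.foldl pvStepB (first.1, [], [])
    match st with
    | (previous_key, value_list, reducer_input) => reducer_input ++ [(previous_key, value_list)]

-- ===== PRECONDITION & SPEC =====
-- Both Pythons raise IndexError on the empty list (sorted_out[0]); nothing else is excluded.
def Pre_sort_output_py (map_output : List (String × String)) : Prop := map_output ≠ []
instance (map_output : List (String × String)) : Decidable (Pre_sort_output_py map_output) := by
  unfold Pre_sort_output_py; infer_instance
def pvWitness_sort_output_py : (List (String × String)) := [("word|the", "1"), ("link|a", "x")]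

def Spec_sort_output_py (map_output : List (String × String)) (out : List (String × List String)) : Prop := out = sort_output_py_alt map_output
instance (map_output : List (String × String)) (out : List (String × List String)) : Decidable (Spec_sort_output_py map_output out) := by unfold Spec_sort_output_py; infer_instance

-- ===== CLAIM (what is proved, stated in full; the proofs are below) =====
def Claim_equal_sort_output_py : Prop := ∀ (map_output : List (String × String)), Dom_sort_output_py map_output → Pre_sort_output_py map_output → Spec_sort_output_py map_output (sort_output_py map_output)

-- ===== LEMMAS AND PROOFS =====

-- canonical grouping of a run: group consecutive equal keys, current group (pk, vl) open
def pvGrp (pk : String) (vl : List String) : List (String × String) → List (String × List String)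
  | [] => [(pk, vl)]
  | (k, v) :: rest => if k = pk then pvGrp pk (vl ++ [v]) rest else (pk, vl) :: pvGrp k [v] rest

-- A's phase 1 as a recursion: split into maximal runs of equal 4-char key prefix
def pvBuck (pkt : String) (m : List (String × String)) : List (String × String) → List (List (String × String))
  | [] => [m]
  | o :: rest =>
    if pvPfx o.1 = pkt then pvBuck pkt (m ++ [o]) rest
    else m :: pvBuck (pvPfx o.1) [o] rest

-- grouping of one whole bucket
def pvG (b : List (String × String)) : List (String × List String) :=
  match b with
  | [] => []
  | b0 :: r => pvGrp b0.1 [b0.2] r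

-- A's inner loop as a recursion (tracks Python's extra `key` variable)
def pvGrpA (pk key : String) (vl : List String) : List (String × String) → List (String × List String)
  | [] => [(key, vl)]
  | (k, v) :: rest => if k = pk then pvGrpA pk k (vl ++ [v]) rest else (pk, vl) :: pvGrpA k k [v] rest

-- key of the last pair, pk if none
def pvLastKey (pk : String) : List (String × String) → String
  | [] => pk
  | (k, _) :: r => pvLastKey k r

theorem pvLastKey_append (m : List (String × String)) (x k : String) (v : String) :
    pvLastKey x (m ++ [(k, v)]) = k := by
  induction m generalizing x with
  | nil => rfl
  | cons h t ih => exact ih h.1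

theorem pvFoldB_eq (s : List (String × String)) :
    ∀ (pk : String) (vl : List String) (acc : List (String × List String)),
    (let st := s.foldl pvStepB (pk, vl, acc);
      st.2.2 ++ [(st.1, st.2.1)]) = acc ++ pvGrp pk vl s := by
  induction s with
  | nil => intro pk vl acc; simp [pvGrp]
  | cons o rest ih =>
    intro pk vl acc
    by_cases h : o.1 = pk
    · simpa [pvStepB, pvGrp, h] using ih pk (vl ++ [o.2]) acc
    · simpa [pvStepB, pvGrp, h] using ih o.1 [o.2] (acc ++ [(pk, vl)])

theorem pvFoldA1_eq (s : List (String × String)) :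
    ∀ (T : List (List (String × String))) (m : List (String × String)) (pkt : String),
    (let st := s.foldl pvStepA1 (T, m, pkt); st.1 ++ [st.2.1]) = T ++ pvBuck pkt m s := by
  induction s with
  | nil => intro T m pkt; simp [pvBuck]
  | cons o rest ih =>
    intro T m pkt
    by_cases h : pvPfx o.1 = pkt
    · simpa [pvStepA1, pvBuck, h] using ih T (m ++ [o]) pkt
    · simpa [pvStepA1, pvBuck, h] using ih (T ++ [m]) [o] (pvPfx o.1)

theorem pvFoldA2i_eq (b : List (String × String)) :
    ∀ (pk key : String) (vl : List String) (acc : List (String × List String)),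
    (let st := b.foldl pvStepA2i (pk, key, vl, acc);
      st.2.2.2 ++ [(st.2.1, st.2.2.1)]) = acc ++ pvGrpA pk key vl b := by
  induction b with
  | nil => intro pk key vl acc; simp [pvGrpA]
  | cons o rest ih =>
    intro pk key vl acc
    by_cases h : o.1 = pk
    · simpa [pvStepA2i, pvGrpA, h] using ih pk o.1 (vl ++ [o.2]) acc
    · simpa [pvStepA2i, pvGrpA, h] using ih o.1 o.1 [o.2] (acc ++ [(pk, vl)])

-- once Python's `key` equals `previous_key`, the extra variable is redundant
theorem pvGrpA_eq_pvGrp (r : List (String × String)) :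
    ∀ (pk : String) (vl : List String), pvGrpA pk pk vl r = pvGrp pk vl r := by
  induction r with
  | nil => intro pk vl; rfl
  | cons o rest ih =>
    intro pk vl
    by_cases h : o.1 = pk
    · simp [pvGrpA, pvGrp, h, ih]
    · simp [pvGrpA, pvGrp, h, ih]

theorem pvG_cons (acc : List (String × List String)) (b0 : String × String)
    (r : List (String × String)) :
    pvStepA2 acc (b0 :: r) = acc ++ pvGrp b0.1 [b0.2] r := by
  have h := pvFoldA2i_eq (b0 :: r) b0.1 "" [] acc
  have h2 : pvGrpA b0.1 "" [] (b0 :: r) = pvGrp b0.1 [b0.2] r := by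
    have : pvGrpA b0.1 "" [] ((b0.1, b0.2) :: r) = pvGrp b0.1 [b0.2] r := by
      simp [pvGrpA, pvGrpA_eq_pvGrp]
    simpa using this
  simp only [pvStepA2]
  rcases hst : (b0 :: r).foldl pvStepA2i (b0.1, "", [], acc) with ⟨a, b, c, d⟩
  simp only [hst] at h
  simpa [h2] using h

theorem pvFoldA2_eq (bs : List (List (String × String))) :
    ∀ (acc : List (String × List String)),
    bs.foldl pvStepA2 acc = acc ++ bs.flatMap pvG := by
  induction bs with
  | nil => intro acc; simp
  | cons b rest ih =>
    intro acc
    match b with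
    | [] => simp [List.foldl, pvStepA2, ih, pvG]
    | b0 :: r =>
      simp only [List.foldl, List.flatMap_cons]
      rw [ih, pvG_cons]
      simp [pvG]

-- a group closes exactly where the key changes
theorem pvGrp_split (m : List (String × String)) :
    ∀ (pk : String) (vl : List String) (k v : String) (rest : List (String × String)),
    pvLastKey pk m ≠ k →
    pvGrp pk vl (m ++ (k, v) :: rest) = pvGrp pk vl m ++ pvGrp k [v] rest := by
  induction m with
  | nil =>
    intro pk vl k v rest hne
    simp only [pvLastKey] at hne
    simp [pvGrp, Ne.symm hne]
  | cons o m' ih =>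
    intro pk vl k v rest hne
    have hne' : pvLastKey o.1 m' ≠ k := hne
    by_cases h : o.1 = pk
    · subst h
      simpa [pvGrp] using ih o.1 (vl ++ [o.2]) k v rest hne'
    · simpa [pvGrp, h] using ih o.1 [o.2] k v rest hne'

theorem pvMain (s : List (String × String)) :
    ∀ (pkt : String) (m : List (String × String)), m ≠ [] →
    (∀ x, pvPfx (pvLastKey x m) = pkt) →
    (pvBuck pkt m s).flatMap pvG = pvG (m ++ s) := by
  induction s with
  | nil => intro pkt m _ _; simp [pvBuck]
  | cons o rest ih =>
    intro pkt m hm hlast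
    by_cases h : pvPfx o.1 = pkt
    · rw [pvBuck, if_pos h]
      have := ih pkt (m ++ [o]) (by simp) (by
        intro x; rw [show (m ++ [o]) = m ++ [(o.1, o.2)] from by simp,
          pvLastKey_append]; exact h)
      rw [this]; simp
    · rw [pvBuck, if_neg h]
      simp only [List.flatMap_cons]
      rw [ih (pvPfx o.1) [o] (by simp) (by intro x; simp [pvLastKey])]
      match m, hm with
      | m0 :: m', _ =>
        have hkey : pvLastKey m0.1 m' ≠ o.1 := by
          intro he
          apply h
          rw [← he]
          exact hlast m0.1
        have hsplit := pvGrp_split m' m0.1 [m0.2] o.1 o.2 rest hkey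
        simp only [Prod.mk.eta] at hsplit
        simp [pvG, hsplit]

-- ===== VERDICT (by name: the statement is the Claim_ definition above) =====
theorem sort_output_py_spec : Claim_equal_sort_output_py := by
  intro map_output _hdom hpre
  unfold Spec_sort_output_py sort_output_py sort_output_py_alt
  have hnil : PySem.List.sorted2 map_output Prod.fst Prod.snd ≠ [] := by
    intro h
    have hp := PySem.List.sorted2_perm (xs := map_output) (k1 := Prod.fst) (k2 := Prod.snd) false
    rw [h] at hp
    exact hpre hp.symm.eq_nil
  match hs : PySem.List.sorted2 map_output Prod.fst Prod.snd, hnil with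
  | first :: rest, _ =>
    simp only []
    -- A side
    have hA1 := pvFoldA1_eq (first :: rest) [] [] (pvPfx first.1)
    simp only [] at hA1
    rw [hA1, pvFoldA2_eq]
    -- B side
    have hB := pvFoldB_eq (first :: rest) first.1 [] []
    simp only [] at hB
    rw [hB]
    -- both equal pvGrp first.1 [first.2] rest
    rw [show pvBuck (pvPfx first.1) [] (first :: rest)
          = pvBuck (pvPfx first.1) [(first.1, first.2)] rest from by
        simp [pvBuck]]
    simp only [List.nil_append]
    rw [pvMain rest (pvPfx first.1) [(first.1, first.2)] (by simp)
        (by intro x; simp [pvLastKey])]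
    simp [pvG, pvGrp]
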